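-- pv_equiv track=rewrite | github.com/niranjan-nagaraju/Development | python/interviewbit/strings/compare_version_numbers/compare_version_numbers.py | lexicographic_compare
-- ===== SOURCE A (Python) =====
-- def lexicographic_compare(s1, s2):
-- 	i = j = 0
-- 	while i<len(s1) and s1[i] == '0':
-- 		i += 1
--
-- 	while j<len(s2) and s2[j] == '0':
-- 		j += 1
--
-- 	while i<len(s1) and j<len(s2) and s1[i] == s2[j]:
-- 		i += 1
-- 		j += 1
--
-- 	# s1 matches s2 completely
-- 	if i==len(s1) and j==len(s2):
-- 		return 0
--
-- 	# ran out of s1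
-- 	# '123' vs '1234'
-- 	if i==len(s1):
-- 		return -1
--
-- 	# ran out of s2
-- 	# '1234' vs '123'
-- 	if j==len(s2):
-- 		return 1
--
-- 	# First differing character in s1 vs s2
-- 	if (len(s1)-i) > (len(s2)-j):
-- 		# s1's remaining characters are of greater length
-- 		# for e.g.
-- 		# '1234' vs '124'
-- 		return 1
-- 	elif (len(s1)-i) < (len(s2)-j):
-- 		# s2's remaining characters are of greater length
-- 		# for e.g.
-- 		# '125' vs '1234'
-- 		return -1
-- 	else: # (len(s1)-i) == (len(s2)-j)
-- 		# s1 and s2 have the same number of trailing characters to compare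
-- 		# but we are sure s1[i] != s2[j]
-- 		# so return -1/+1
-- 		return (-1 if (s1[i] < s2[j]) else +1)
-- ===== SOURCE B (Python) =====
-- def lexicographic_compare(s1, s2):
--     a = s1.lstrip('0')
--     b = s2.lstrip('0')
--     if len(a) != len(b):
--         return 1 if len(a) > len(b) else -1
--     if a == b:
--         return 0
--     return -1 if a < b else 1
-- ===== Notes on version B (the rewrite author's own statement) =====
-- stated objective: simpler
-- what changed: A's three index-advancing while loops (skip leading zeros of each string, then walk a common prefix and branch on remaining lengths and the first differing character) are replaced by a length-first decomposition: strip leading zeros with lstrip, compare the stripped lengths, and otherwise rely on one built-in lexicographic string comparison. (same O(n) asymptotics; the work moves from a per-character Python loop into C-level built-ins)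
import Mathlib
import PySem

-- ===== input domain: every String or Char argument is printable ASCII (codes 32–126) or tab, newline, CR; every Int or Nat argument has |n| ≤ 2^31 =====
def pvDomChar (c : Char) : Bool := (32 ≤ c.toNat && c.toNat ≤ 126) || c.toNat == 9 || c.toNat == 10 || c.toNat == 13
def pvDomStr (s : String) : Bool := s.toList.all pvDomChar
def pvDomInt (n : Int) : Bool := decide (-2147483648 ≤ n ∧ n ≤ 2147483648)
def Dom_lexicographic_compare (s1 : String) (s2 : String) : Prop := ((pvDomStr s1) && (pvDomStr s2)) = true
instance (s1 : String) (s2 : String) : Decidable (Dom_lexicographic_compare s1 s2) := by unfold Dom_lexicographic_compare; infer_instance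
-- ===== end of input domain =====

-- B replaces A's three index-advancing while loops with a length-first decomposition over
-- leading-zero-stripped strings (objective: simpler).

-- ===== PORT A =====
-- the first two while loops: advance the index past leading '0's (modelled by consuming the list)
def pvSkipZeros : List Char → List Char
  | [] => []
  | c :: cs => if c = '0' then pvSkipZeros cs else c :: cs

-- the third while loop plus the if/elif chain, on the remaining suffixes
def pvCmpRest : List Char → List Char → Int
  | [], [] => 0                              -- i==len(s1) and j==len(s2)
  | [], _ :: _ => -1                         -- ran out of s1
  | _ :: _, [] => 1                          -- ran out of s2
  | a :: as, b :: bs =>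
    if a = b then pvCmpRest as bs            -- loop body: i += 1; j += 1
    else if as.length > bs.length then 1     -- (len(s1)-i) > (len(s2)-j)
    else if as.length < bs.length then -1    -- (len(s1)-i) < (len(s2)-j)
    else if a < b then -1 else 1             -- first differing character

def lexicographic_compare (s1 : String) (s2 : String) : Int :=
  pvCmpRest (pvSkipZeros s1.toList) (pvSkipZeros s2.toList)

-- ===== PORT B =====
-- Python's lexicographic '<' on strings, over char lists
def pvLexLt : List Char → List Char → Bool
  | [], [] => false
  | [], _ :: _ => true
  | _ :: _, [] => false
  | a :: as, b :: bs => if a < b then true else if b < a then false else pvLexLt as bs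

def lexicographic_compare_alt (s1 : String) (s2 : String) : Int :=
  let a := s1.toList.dropWhile (fun c => c = '0')    -- s1.lstrip('0')
  let b := s2.toList.dropWhile (fun c => c = '0')    -- s2.lstrip('0')
  if a.length ≠ b.length then (if a.length > b.length then 1 else -1)
  else if a = b then 0
  else if pvLexLt a b then -1 else 1

-- ===== PRECONDITION & SPEC =====
def Spec_lexicographic_compare (s1 : String) (s2 : String) (out : Int) : Prop := out = lexicographic_compare_alt s1 s2
instance (s1 : String) (s2 : String) (out : Int) : Decidable (Spec_lexicographic_compare s1 s2 out) := by unfold Spec_lexicographic_compare; infer_instance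

-- ===== CLAIM (what is proved, stated in full; the proofs are below) =====
def Claim_equal_lexicographic_compare : Prop := ∀ (s1 : String) (s2 : String), Dom_lexicographic_compare s1 s2 → Spec_lexicographic_compare s1 s2 (lexicographic_compare s1 s2)

-- ===== LEMMAS AND PROOFS =====

lemma pvSkipZeros_eq_dropWhile (xs : List Char) :
    pvSkipZeros xs = xs.dropWhile (fun c => c = '0') := by
  induction xs with
  | nil => rfl
  | cons c cs ih =>
    simp only [pvSkipZeros, List.dropWhile]
    by_cases h : c = '0' <;> simp [h, ih]

-- the core: B's length-first comparison computes A's prefix-skipping loop result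
lemma pvCmpRest_eq_core (a b : List Char) :
    pvCmpRest a b =
      (if a.length ≠ b.length then (if a.length > b.length then (1 : Int) else -1)
       else if a = b then 0
       else if pvLexLt a b then -1 else 1) := by
  induction a generalizing b with
  | nil =>
    cases b with
    | nil => simp [pvCmpRest]
    | cons y ys => simp [pvCmpRest]
  | cons x xs ih =>
    cases b with
    | nil => simp [pvCmpRest]
    | cons y ys =>
      by_cases hxy : x = y
      · subst hxy
        simp only [pvCmpRest, if_true, ih ys]
        by_cases hlen : xs.length = ys.length
        · simp [hlen, pvLexLt]
        · simp [hlen]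
      · have hne : (x :: xs : List Char) ≠ y :: ys := by
          intro h; exact hxy (by injection h)
        simp only [pvCmpRest, if_neg hxy]
        by_cases hlen : xs.length = ys.length
        · have htricho : x < y ∨ y < x := by
            rcases lt_trichotomy x y with h | h | h
            · exact Or.inl h
            · exact absurd h hxy
            · exact Or.inr h
          have hlex : pvLexLt (x :: xs) (y :: ys) = decide (x < y) := by
            rcases htricho with h | h
            · simp [pvLexLt, h]
            · have hnlt : ¬ x < y := not_lt_of_gt h
              simp [pvLexLt, h, hnlt]
          simp [hlen, hne, hlex]
        · simp only [List.length_cons]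
          split_ifs <;> omega

-- ===== VERDICT (by name: the statement is the Claim_ definition above) =====
theorem lexicographic_compare_spec : Claim_equal_lexicographic_compare := by
  intro s1 s2 _
  unfold Spec_lexicographic_compare lexicographic_compare lexicographic_compare_alt
  rw [pvSkipZeros_eq_dropWhile, pvSkipZeros_eq_dropWhile, pvCmpRest_eq_core]
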